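-- pv_equiv track=rewrite | github.com/fsq/leetcode | 3141. Maximum Hamming Distances.py | maxHammingDistances
-- ===== SOURCE A (Python) =====
-- from typing import List
--
-- import queue
--
-- def maxHammingDistances(nums: List[int], m: int) -> List[int]:
--     q = queue.Queue()
--     dis = [None] * (1<<m)
--     for i, x in enumerate(nums):
--         dis[x] = 0
--         q.put([x, 0])
--
--     while not q.empty():
--         x, d = q.get()
--         for i in range(m):
--             y = x ^ (1<<i)
--             if dis[y] == None:
--                 dis[y] = d + 1
--                 q.put([y, d+1])
--
--     return [m - dis[(1<<m)-1 - x] for x in nums]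
-- ===== SOURCE B (Python) =====
-- from typing import List
--
--
-- def maxHammingDistances(nums: List[int], m: int) -> List[int]:
--     # Dynamic programming (min-plus / subset-sum transform over the m bit
--     # dimensions) instead of BFS: start from 0 at the sources and an m+1
--     # sentinel elsewhere, then for each bit build a new table where every cell
--     # is relaxed against its neighbour across that bit.  After all m passes
--     # dis[y] is the minimum Hamming distance from y to any source.
--     size = 1 << m
--     dis = [m + 1] * size
--     for x in nums:
--         dis[x] = 0
--     for i in range(m):
--         bit = 1 << i
--         dis = [min(dis[y], dis[y ^ bit] + 1) for y in range(size)]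
--     return [m - dis[size - 1 - x] for x in nums]
-- ===== Notes on version B (the rewrite author's own statement) =====
-- stated objective: alternative
-- what changed: Replaces the multi-source BFS with a queue entirely by a dynamic-programming min-plus (subset-sum) transform: the distance table starts at 0 on sources and an m+1 sentinel elsewhere, and m relaxation passes (one per bit dimension, each rebuilding the table by min(dis[y], dis[y^bit]+1)) yield the exact nearest-source Hamming distances.
import Mathlib
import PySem

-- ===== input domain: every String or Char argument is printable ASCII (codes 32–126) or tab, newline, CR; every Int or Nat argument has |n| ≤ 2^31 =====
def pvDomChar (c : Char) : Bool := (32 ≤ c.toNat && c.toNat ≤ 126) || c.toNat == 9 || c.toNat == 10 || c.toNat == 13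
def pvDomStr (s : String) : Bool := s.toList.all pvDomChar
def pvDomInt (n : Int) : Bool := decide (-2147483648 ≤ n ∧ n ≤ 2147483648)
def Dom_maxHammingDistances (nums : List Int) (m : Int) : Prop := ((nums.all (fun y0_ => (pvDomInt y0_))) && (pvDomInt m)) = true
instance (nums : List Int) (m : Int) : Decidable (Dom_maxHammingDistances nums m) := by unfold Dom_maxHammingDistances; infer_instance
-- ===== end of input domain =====

-- B replaces A's multi-source BFS (queue.Queue of [node, dist] pairs) by a dynamic-programming
-- min-plus (subset-sum) transform: m relaxation passes, one per bit dimension, over a table that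
-- starts at 0 on sources and at the sentinel m+1 elsewhere; equivalence is proved on all inputs
-- where A returns.

-- shared primitive helper (Python's 1 << i, used by both ports)
def pvShl1 (i : Int) : Int := 1 <<< i.toNat  -- Python 1 << i; exact for 0 ≤ i (i < 0 raises in Python, outside Pre_)
def countNone (l : List (Option Int)) : Nat := l.countP (fun o => o.isNone)

-- ===== PORT A =====
-- body of A's 'for i in range(m)' for one dequeued pair (x, d); state = (dis, queue contents).
-- Python's 'dis[y] == None' raises IndexError when y is out of range; that case (pyGet? = none)
-- falls to the else branch here and is unreachable under Pre_.
def pvInnerA (x d : Int) (st : List (Option Int) × List (Int × Int)) (i : Int) :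
    List (Option Int) × List (Int × Int) :=
  let y := PySem.Int.bxor x (pvShl1 i)
  if PySem.List.pyGet? st.1 y = some none then
    (PySem.List.pySetD st.1 y (some (d + 1)), st.2 ++ [(y, d + 1)])
  else st

def pvStepA (m x d : Int) (st : List (Option Int) × List (Int × Int)) :
    List (Option Int) × List (Int × Int) :=
  (PySem.List.pyRange 0 m 1).foldl (pvInnerA x d) st

-- measure lemmas needed by the port's termination proof
theorem pvFoldl_meas_le {α σ : Type} (meas : σ → Nat) (f : σ → α → σ)
    (h : ∀ s a, meas (f s a) ≤ meas s) :
    ∀ (l : List α) (s : σ), meas (List.foldl f s l) ≤ meas s := by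
  intro l
  induction l with
  | nil => intro s; simp
  | cons a l ih => intro s; exact le_trans (ih (f s a)) (h s a)

theorem pvCountP_set_lt (xs : List (Option Int)) (n : Nat) (v : Int)
    (h : xs[n]? = some none) :
    countNone (xs.set n (some v)) < countNone xs := by
  induction xs generalizing n with
  | nil => simp at h
  | cons a as ih =>
      cases n with
      | zero =>
          have ha : a = none := by simpa using h
          subst ha
          simp [countNone]
      | succ n =>
          have h' : as[n]? = some none := by simpa using h
          have := ih n h'
          simp only [List.set_cons_succ, countNone, List.countP_cons] at *
          omega

theorem pvCountNone_pySetD_lt (xs : List (Option Int)) (i : Int) (v : Int)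
    (h : PySem.List.pyGet? xs i = some none) :
    countNone (PySem.List.pySetD xs i (some v)) < countNone xs := by
  cases hk : PySem.List.pyIdx? xs.length i with
  | none => simp [PySem.List.pyGet?, hk] at h
  | some k =>
      simp only [PySem.List.pyGet?, hk] at h
      simp only [PySem.List.pySetD, PySem.List.pySet?, hk, Option.map_some, Option.getD_some]
      exact pvCountP_set_lt xs k v h

theorem pvInnerA_meas_le (x d : Int) (st : List (Option Int) × List (Int × Int)) (i : Int) :
    countNone (pvInnerA x d st i).1 + (pvInnerA x d st i).2.length ≤
      countNone st.1 + st.2.length := by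
  unfold pvInnerA
  by_cases h : PySem.List.pyGet? st.1 (PySem.Int.bxor x (pvShl1 i)) = some none
  · simp only [h, if_pos]
    have := pvCountNone_pySetD_lt st.1 (PySem.Int.bxor x (pvShl1 i)) (d + 1) h
    simp only [List.length_append, List.length_cons, List.length_nil]
    omega
  · simp [h]

theorem pvStepA_meas_le (m x d : Int) (st : List (Option Int) × List (Int × Int)) :
    countNone (pvStepA m x d st).1 + (pvStepA m x d st).2.length ≤
      countNone st.1 + st.2.length := by
  exact pvFoldl_meas_le (fun s => countNone s.1 + s.2.length) (pvInnerA x d)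
    (pvInnerA_meas_le x d) _ st

-- A's 'while not q.empty()' loop (the FIFO queue as a list)
def pvBfsA (m : Int) (dis : List (Option Int)) (q : List (Int × Int)) : List (Option Int) :=
  match q with
  | [] => dis
  | (x, d) :: rest =>
      pvBfsA m (pvStepA m x d (dis, rest)).1 (pvStepA m x d (dis, rest)).2
termination_by countNone dis + q.length
decreasing_by
  have h := pvStepA_meas_le m x d (dis, rest)
  simp only [List.length_cons]
  simp at h
  omega

def maxHammingDistances (nums : List Int) (m : Int) : List Int :=
  -- dis = [None] * (1 << m); for i, x in enumerate(nums): dis[x] = 0; q.put([x, 0])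
  let size := pvShl1 m
  let init := (PySem.List.enumerate nums 0).foldl
    (fun st (p : Int × Int) => (PySem.List.pySetD st.1 p.2 (some 0), st.2 ++ [(p.2, (0 : Int))]))
    (List.replicate size.toNat (none : Option Int), ([] : List (Int × Int)))
  let dis := pvBfsA m init.1 init.2
  -- [m - dis[(1<<m)-1 - x] for x in nums]; within Pre_ the looked-up entry is always set
  -- (Python's IndexError/TypeError cases are unreachable there), so the defaults are never observed.
  nums.map (fun x => m - (((PySem.List.pyGet? dis (size - 1 - x)).getD none).getD 0))

-- ===== PORT B =====
-- dis = [m + 1] * size; for x in nums: dis[x] = 0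
-- then m relaxation passes: dis = [min(dis[y], dis[y ^ bit] + 1) for y in range(size)]
-- (indices y and y ^ bit are always in range under Pre_, so pyGetD's default is never observed)
def maxHammingDistances_alt (nums : List Int) (m : Int) : List Int :=
  let size := pvShl1 m
  let dis0 := nums.foldl (fun dis x => PySem.List.pySetD dis x (0 : Int))
    (List.replicate size.toNat (m + 1))
  let dis := (PySem.List.pyRange 0 m 1).foldl
    (fun dis i =>
      let bit := pvShl1 i
      (PySem.List.pyRange 0 size 1).map
        (fun y => min (PySem.List.pyGetD dis y 0)
          (PySem.List.pyGetD dis (PySem.Int.bxor y bit) 0 + 1)))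
    dis0
  nums.map (fun x => m - PySem.List.pyGetD dis (size - 1 - x) 0)

-- ===== PRECONDITION & SPEC =====
-- Pre_ = exactly where Python A returns: m ≥ 0 (else 1 << m raises ValueError) and every x in nums
-- in [0, 2^m) (x ≥ 2^m raises IndexError at dis[x] = 0; x < 0 makes the final comprehension's
-- index (1<<m)-1-x exceed the list, an IndexError).
def Pre_maxHammingDistances (nums : List Int) (m : Int) : Prop :=
  0 ≤ m ∧ ∀ x ∈ nums, 0 ≤ x ∧ x < (2 : Int) ^ m.toNat
instance (nums : List Int) (m : Int) : Decidable (Pre_maxHammingDistances nums m) := by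
  unfold Pre_maxHammingDistances; infer_instance

def pvWitness_maxHammingDistances : List Int × Int := ([0, 3, 3], 2)

def Spec_maxHammingDistances (nums : List Int) (m : Int) (out : List Int) : Prop := out = maxHammingDistances_alt nums m
instance (nums : List Int) (m : Int) (out : List Int) : Decidable (Spec_maxHammingDistances nums m out) := by unfold Spec_maxHammingDistances; infer_instance

-- ===== CLAIM (what is proved, stated in full; the proofs are below) =====
def Claim_equal_maxHammingDistances : Prop := ∀ (nums : List Int) (m : Int), Dom_maxHammingDistances nums m → Pre_maxHammingDistances nums m → Spec_maxHammingDistances nums m (maxHammingDistances nums m)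

-- ===== LEMMAS AND PROOFS =====

def pvPop (m v : Nat) : Nat := ∑ i ∈ Finset.range m, (v.testBit i).toNat

theorem pvPop_le (m v : Nat) : pvPop m v ≤ m := by
  unfold pvPop
  calc ∑ i ∈ Finset.range m, (v.testBit i).toNat ≤ ∑ _i ∈ Finset.range m, 1 :=
        Finset.sum_le_sum (by intro i _; cases v.testBit i <;> simp)
    _ = m := by simp

theorem pvPop_eq_zero_iff (m v : Nat) (hv : v < 2^m) : pvPop m v = 0 ↔ v = 0 := by
  constructor
  · intro h
    apply Nat.eq_of_testBit_eq
    intro i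
    simp only [Nat.zero_testBit]
    by_cases hi : i < m
    · have := Finset.sum_eq_zero_iff.mp h i (Finset.mem_range.mpr hi)
      cases hb : v.testBit i <;> simp [hb] at this ⊢
    · exact Nat.testBit_lt_two_pow (lt_of_lt_of_le hv (Nat.pow_le_pow_right (by norm_num) (by omega)))
  · intro h; subst h; simp [pvPop]

theorem pvPop_split (m v i : Nat) (hi : i < m) :
    pvPop m v = (∑ j ∈ (Finset.range m).erase i, (v.testBit j).toNat) + (v.testBit i).toNat := by
  unfold pvPop
  rw [Finset.sum_erase_add _ _ (Finset.mem_range.mpr hi)]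

theorem pvPop_flip_erase (m v i : Nat) (hi : i < m) :
    ∑ j ∈ (Finset.range m).erase i, ((v ^^^ 2^i).testBit j).toNat
      = ∑ j ∈ (Finset.range m).erase i, (v.testBit j).toNat := by
  apply Finset.sum_congr rfl
  intro j hj
  have hne : i ≠ j := fun h => (Finset.mem_erase.mp hj).1 h.symm
  simp [Nat.testBit_xor, Nat.testBit_two_pow, hne]

theorem pvPop_flip_true (m v i : Nat) (hi : i < m) (h : v.testBit i = true) :
    pvPop m (v ^^^ 2^i) + 1 = pvPop m v := by
  rw [pvPop_split m v i hi, pvPop_split m (v ^^^ 2^i) i hi, pvPop_flip_erase m v i hi]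
  simp [Nat.testBit_xor, Nat.testBit_two_pow, h]

theorem pvPop_flip_false (m v i : Nat) (hi : i < m) (h : v.testBit i = false) :
    pvPop m (v ^^^ 2^i) = pvPop m v + 1 := by
  rw [pvPop_split m v i hi, pvPop_split m (v ^^^ 2^i) i hi, pvPop_flip_erase m v i hi]
  simp [Nat.testBit_xor, Nat.testBit_two_pow, h]

theorem pvPop_flip_bounds (m v i : Nat) (hi : i < m) :
    pvPop m v ≤ pvPop m (v ^^^ 2^i) + 1 ∧ pvPop m (v ^^^ 2^i) ≤ pvPop m v + 1 := by
  cases h : v.testBit i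
  · have := pvPop_flip_false m v i hi h; omega
  · have := pvPop_flip_true m v i hi h; omega

theorem pvPop_pos_exists (m v : Nat) (h : 0 < pvPop m v) : ∃ i < m, v.testBit i = true := by
  by_contra hc
  push Not at hc
  have : pvPop m v = 0 := Finset.sum_eq_zero (by
    intro i hi
    have := hc i (Finset.mem_range.mp hi)
    simp [Bool.eq_false_iff.mpr (by simpa using this)])
  omega

def pvIsMin (srcs : List Nat) (m v e : Nat) : Prop :=
  (∃ s ∈ srcs, pvPop m (v ^^^ s) = e) ∧ ∀ s ∈ srcs, e ≤ pvPop m (v ^^^ s)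

theorem pvIsMin_unique {srcs : List Nat} {m v e e' : Nat}
    (h : pvIsMin srcs m v e) (h' : pvIsMin srcs m v e') : e = e' := by
  obtain ⟨⟨s, hs, hse⟩, hlb⟩ := h
  obtain ⟨⟨t, ht, hte⟩, hlb'⟩ := h'
  have := hlb t ht
  have := hlb' s hs
  omega

theorem pvIsMin_exists (srcs : List Nat) (m v : Nat) (hne : srcs ≠ []) :
    ∃ e, pvIsMin srcs m v e := by
  induction srcs with
  | nil => exact absurd rfl hne
  | cons s t ih =>
      rcases List.eq_nil_or_concat' t with h | _
      · subst h
        exact ⟨pvPop m (v ^^^ s), ⟨⟨s, by simp, rfl⟩, by intro s' hs'; simp at hs'; subst hs'; rfl⟩⟩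
      · obtain ⟨e, he⟩ := ih (by rintro rfl; simp_all)
        obtain ⟨⟨u, hu, hue⟩, hlb⟩ := he
        by_cases hc : pvPop m (v ^^^ s) ≤ e
        · exact ⟨pvPop m (v ^^^ s), ⟨⟨s, by simp, rfl⟩, by
            intro s' hs'
            rcases List.mem_cons.mp hs' with h | h
            · subst h; rfl
            · exact le_trans hc (hlb s' h)⟩⟩
        · exact ⟨e, ⟨⟨u, List.mem_cons_of_mem _ hu, hue⟩, by
            intro s' hs'
            rcases List.mem_cons.mp hs' with h | h
            · subst h; omega
            · exact hlb s' h⟩⟩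

theorem pvIsMin_nonempty (srcs : List Nat) {m v e : Nat} (h : pvIsMin srcs m v e) : srcs ≠ [] := by
  obtain ⟨⟨s, hs, _⟩, _⟩ := h
  intro hc; subst hc; simp at hs

-- shifting the base point across one bit: (v ^^^ 2^i) ^^^ s = (v ^^^ s) ^^^ 2^i
theorem pvXor_shift (v s b : Nat) : v ^^^ b ^^^ s = v ^^^ s ^^^ b := by
  rw [Nat.xor_assoc, Nat.xor_assoc, Nat.xor_comm b s]

theorem pvIsMin_flip (srcs : List Nat) {m v i e e' : Nat} (hi : i < m)
    (h : pvIsMin srcs m v e) (h' : pvIsMin srcs m (v ^^^ 2^i) e') :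
    e ≤ e' + 1 ∧ e' ≤ e + 1 := by
  obtain ⟨⟨s, hs, hse⟩, hlb⟩ := h
  obtain ⟨⟨t, ht, hte⟩, hlb'⟩ := h'
  constructor
  · have h1 := hlb t ht
    have h2 := (pvPop_flip_bounds m (v ^^^ t) i hi).1
    rw [← pvXor_shift v t (2^i)] at h2
    omega
  · have h1 := hlb' s hs
    have h2 := (pvPop_flip_bounds m (v ^^^ s) i hi).2
    rw [pvXor_shift v s (2^i)] at h1
    omega

theorem pvIsMin_descent (srcs : List Nat) {m v e : Nat}
    (h : pvIsMin srcs m v (e + 1)) : ∃ i < m, pvIsMin srcs m (v ^^^ 2^i) e := by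
  obtain ⟨⟨s, hs, hse⟩, hlb⟩ := h
  obtain ⟨i, hi, hbit⟩ := pvPop_pos_exists m (v ^^^ s) (by omega)
  refine ⟨i, hi, ⟨⟨s, hs, ?_⟩, ?_⟩⟩
  · rw [pvXor_shift]
    have := pvPop_flip_true m (v ^^^ s) i hi hbit
    omega
  · intro t ht
    have h1 := hlb t ht
    have h2 := (pvPop_flip_bounds m (v ^^^ t) i hi).1
    rw [← pvXor_shift v t (2^i)] at h2
    omega

-- pop of the xor is zero exactly when the points coincide (both below 2^m)
theorem pvPop_xor_eq_zero {m v s : Nat} (hv : v < 2^m) (hs : s < 2^m)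
    (h : pvPop m (v ^^^ s) = 0) : v = s := by
  have := (pvPop_eq_zero_iff m (v ^^^ s) (Nat.xor_lt_two_pow hv hs)).mp h
  exact Nat.xor_eq_zero_iff.mp this

-- bit-k decomposition facts used by the DP recurrence
theorem pvBit_high (b k : Nat) (h1 : b < 2^(k+1)) (h2 : ¬ b < 2^k) : b.testBit k = true := by
  by_contra hc
  apply h2
  apply Nat.lt_pow_two_of_testBit
  intro i hi
  rcases Nat.eq_or_lt_of_le hi with h | h
  · subst h; simpa using hc
  · exact Nat.testBit_lt_two_pow (lt_of_lt_of_le h1 (Nat.pow_le_pow_right (by norm_num) h))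

theorem pvXor_excl (b k : Nat) (h : b < 2^k) : ¬ (b ^^^ 2^k < 2^k) := by
  intro hc
  have h1 : (b ^^^ 2^k).testBit k = false := Nat.testBit_lt_two_pow hc
  have h2 : b.testBit k = false := Nat.testBit_lt_two_pow h
  simp [Nat.testBit_xor, h2, Nat.testBit_two_pow] at h1

theorem pvXor_lt_iff (b k : Nat) : b < 2^(k+1) ↔ (b < 2^k ∨ b ^^^ 2^k < 2^k) := by
  constructor
  · intro h1
    by_cases h2 : b < 2^k
    · exact Or.inl h2
    · refine Or.inr (Nat.lt_pow_two_of_testBit _ ?_)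
      intro i hi
      rcases Nat.eq_or_lt_of_le hi with h | h
      · subst h; simp [Nat.testBit_xor, pvBit_high b k h1 h2, Nat.testBit_two_pow]
      · have hb : b.testBit i = false :=
          Nat.testBit_lt_two_pow (lt_of_lt_of_le h1 (Nat.pow_le_pow_right (by norm_num) h))
        have hp : (2^k : Nat).testBit i = false := by
          simp [Nat.testBit_two_pow]; omega
        simp [Nat.testBit_xor, hb, hp]
  · rintro (h | h)
    · exact lt_of_lt_of_le h (Nat.pow_le_pow_right (by norm_num) (by omega))
    · have : b = (b ^^^ 2^k) ^^^ 2^k := by rw [Nat.xor_xor_cancel_right]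
      rw [this]
      exact Nat.xor_lt_two_pow (lt_of_lt_of_le h (by
        exact Nat.pow_le_pow_right (by norm_num) (by omega)))
        (Nat.pow_lt_pow_right (by norm_num) (by omega))

theorem pvPop_of_low (m b k : Nat) (hk : k < m) (h : b ^^^ 2^k < 2^k) :
    pvPop m b = pvPop m (b ^^^ 2^k) + 1 := by
  have hc : (b ^^^ 2^k).testBit k = false := Nat.testBit_lt_two_pow h
  have := pvPop_flip_false m (b ^^^ 2^k) k hk hc
  rw [Nat.xor_xor_cancel_right] at this
  exact this

-- the DP table value after processing bit dimensions 0..k-1: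
-- minimum (as Int) of pvPop over sources within xor-distance < 2^k, sentinel m+1
def pvBk (srcs : List Nat) (m k v : Nat) : Int :=
  srcs.foldr (fun s acc => if v ^^^ s < 2^k then min ((pvPop m (v ^^^ s) : Int)) acc else acc)
    ((m : Int) + 1)

theorem pvBk_nonneg (srcs : List Nat) (m k v : Nat) : 0 ≤ pvBk srcs m k v := by
  induction srcs with
  | nil => simp [pvBk]; omega
  | cons s t ih =>
      simp only [pvBk, List.foldr_cons] at ih ⊢
      split_ifs
      · have : (0:Int) ≤ (pvPop m (v ^^^ s) : Int) := by positivity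
        omega
      · exact ih

theorem pvBk_zero (srcs : List Nat) (m v : Nat) :
    pvBk srcs m 0 v = if v ∈ srcs then 0 else (m : Int) + 1 := by
  induction srcs with
  | nil => simp [pvBk]
  | cons s t ih =>
      have hnn := pvBk_nonneg t m 0 v
      simp only [pvBk, List.foldr_cons] at ih hnn ⊢
      by_cases hv : v = s
      · have hcond : v ^^^ s < 2^0 := by simp [hv]
        rw [if_pos hcond]
        have hpop : pvPop m (v ^^^ s) = 0 := by simp [hv, pvPop]
        rw [hpop, if_pos (by simp [hv] : v ∈ s :: t)]
        simp only [Nat.cast_zero]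
        omega
      · have hcond : ¬ (v ^^^ s < 2^0) := by
          simp only [pow_zero, Nat.lt_one_iff]
          intro hc
          exact hv (Nat.xor_eq_zero_iff.mp hc)
        rw [if_neg hcond, ih]
        have hmem : (v ∈ s :: t) ↔ (v ∈ t) := by simp [hv]
        rw [if_congr hmem rfl rfl]

theorem pvBk_cons (s : Nat) (t : List Nat) (m k v : Nat) :
    pvBk (s :: t) m k v =
      if v ^^^ s < 2^k then min ((pvPop m (v ^^^ s) : Int)) (pvBk t m k v) else pvBk t m k v := rfl

theorem pvBk_succ (srcs : List Nat) (m k v : Nat) (hk : k < m) :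
    pvBk srcs m (k+1) v = min (pvBk srcs m k v) (pvBk srcs m k (v ^^^ 2^k) + 1) := by
  induction srcs with
  | nil => simp [pvBk]
  | cons s t ih =>
      have hb2 : v ^^^ 2^k ^^^ s = (v ^^^ s) ^^^ 2^k := pvXor_shift v s (2^k)
      rw [pvBk_cons, pvBk_cons, pvBk_cons, hb2, ih]
      set b := v ^^^ s with hb
      set Ct := pvBk t m k v with hCt
      set Dt := pvBk t m k (v ^^^ 2^k) with hDt
      by_cases hc2 : b < 2^k
      · have hc1 : b < 2^(k+1) := (pvXor_lt_iff b k).mpr (Or.inl hc2)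
        have hc3 : ¬ (b ^^^ 2^k < 2^k) := pvXor_excl b k hc2
        rw [if_pos hc1, if_pos hc2, if_neg hc3]
        omega
      · by_cases hc3 : b ^^^ 2^k < 2^k
        · have hc1 : b < 2^(k+1) := (pvXor_lt_iff b k).mpr (Or.inr hc3)
          have hpop : pvPop m b = pvPop m (b ^^^ 2^k) + 1 := pvPop_of_low m b k hk hc3
          rw [if_pos hc1, if_neg hc2, if_pos hc3]
          push_cast [hpop]
          omega
        · have hc1 : ¬ b < 2^(k+1) := fun h => by
            rcases (pvXor_lt_iff b k).mp h with h | h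
            · exact hc2 h
            · exact hc3 h
          rw [if_neg hc1, if_neg hc2, if_neg hc3]

theorem pvBk_le_of_mem (srcs : List Nat) (m k v : Nat) {s : Nat} (hs : s ∈ srcs)
    (hcond : v ^^^ s < 2^k) : pvBk srcs m k v ≤ (pvPop m (v ^^^ s) : Int) := by
  induction srcs with
  | nil => simp at hs
  | cons a t ih =>
      simp only [pvBk, List.foldr_cons]
      rcases List.mem_cons.mp hs with h | h
      · subst h
        rw [if_pos hcond]
        exact min_le_left _ _
      · have := ih h
        simp only [pvBk] at this
        split_ifs
        · exact le_trans (min_le_right _ _) this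
        · exact this

theorem pvBk_ge (srcs : List Nat) (m k v e : Nat) (he : (e : Int) ≤ (m : Int) + 1)
    (h : ∀ s ∈ srcs, v ^^^ s < 2^k → e ≤ pvPop m (v ^^^ s)) :
    (e : Int) ≤ pvBk srcs m k v := by
  induction srcs with
  | nil => simpa [pvBk] using he
  | cons a t ih =>
      have ht := ih (fun s hs => h s (List.mem_cons_of_mem _ hs))
      simp only [pvBk, List.foldr_cons] at ht ⊢
      split_ifs with hc
      · have := h a (List.mem_cons_self) hc
        have : (e : Int) ≤ (pvPop m (v ^^^ a) : Int) := by exact_mod_cast this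
        omega
      · exact ht

theorem pvBk_full (srcs : List Nat) (m v e : Nat) (hv : v < 2^m)
    (hsrc : ∀ s ∈ srcs, s < 2^m) (h : pvIsMin srcs m v e) : pvBk srcs m m v = (e : Int) := by
  obtain ⟨⟨s, hs, hse⟩, hlb⟩ := h
  apply le_antisymm
  · calc pvBk srcs m m v ≤ (pvPop m (v ^^^ s) : Int) :=
          pvBk_le_of_mem srcs m m v hs (Nat.xor_lt_two_pow hv (hsrc s hs))
      _ = (e : Int) := by exact_mod_cast hse
  · exact pvBk_ge srcs m m v e
      (by have : e ≤ m := by have := pvPop_le m (v ^^^ s); omega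
          omega)
      (fun t ht _ => hlb t ht)

-- ===== A-side abstractions =====

def pvLabeled (dis : List (Option Int)) (v : Nat) : Prop := ∃ z : Int, dis[v]? = some (some z)
def pvClosed (m : Nat) (dis : List (Option Int)) (v : Nat) : Prop := ∀ i < m, pvLabeled dis (v ^^^ 2^i)

theorem pvLt_of_getElem? {α : Type} {l : List α} {n : Nat} {x : α} (h : l[n]? = some x) :
    n < l.length := by
  by_contra hc
  rw [List.getElem?_eq_none_iff.mpr (by omega)] at h
  simp at h

theorem pvCell_inj {v i j : Nat} (h : v ^^^ 2^i = v ^^^ 2^j) : i = j :=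
  Nat.pow_right_injective (by norm_num) (Nat.xor_right_inj.mp h)


-- the body of A's inner loop at the Nat level
def pvInnerN (v : Nat) (d : Int) (st : List (Option Int) × List (Int × Int)) (i : Nat) :
    List (Option Int) × List (Int × Int) := pvInnerA (v : Int) d st (i : Int)

theorem pvShl1_natCast (i : Nat) : pvShl1 (i : Int) = ((2^i : Nat) : Int) := by
  simp [pvShl1, Int.shiftLeft_eq]

theorem pvInnerN_eq (v : Nat) (d : Int) (st : List (Option Int) × List (Int × Int)) (i : Nat) :
    pvInnerN v d st i =
      if st.1[v ^^^ 2^i]? = some none then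
        (st.1.set (v ^^^ 2^i) (some (d + 1)), st.2 ++ [(((v ^^^ 2^i : Nat) : Int), d + 1)])
      else st := by
  unfold pvInnerN pvInnerA
  simp only [pvShl1_natCast, PySem.Int.bxor_natCast, PySem.List.pyGet?_natCast,
    PySem.List.pySetD_natCast]

-- effect of one dequeued node's whole bit loop on the state
theorem pvStep_char (v : Nat) (d : Int) (bits : List Nat) (hnd : bits.Nodup) :
    ∀ (dis : List (Option Int)) (rest : List (Int × Int)),
    (bits.foldl (pvInnerN v d) (dis, rest)).1.length = dis.length ∧
    (bits.foldl (pvInnerN v d) (dis, rest)).2 =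
      rest ++ (bits.filter (fun i => decide (dis[v ^^^ 2^i]? = some none))).map
        (fun i => (((v ^^^ 2^i : Nat) : Int), d + 1)) ∧
    (∀ w : Nat, (∀ i ∈ bits, w ≠ v ^^^ 2^i) →
      (bits.foldl (pvInnerN v d) (dis, rest)).1[w]? = dis[w]?) ∧
    (∀ i ∈ bits, (bits.foldl (pvInnerN v d) (dis, rest)).1[v ^^^ 2^i]? =
      if dis[v ^^^ 2^i]? = some none then some (some (d + 1)) else dis[v ^^^ 2^i]?) := by
  induction bits with
  | nil => intro dis rest; simp
  | cons i bs ih =>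
      intro dis rest
      have hnotin : i ∉ bs := (List.nodup_cons.mp hnd).1
      have hndbs : bs.Nodup := (List.nodup_cons.mp hnd).2
      have hcellne : ∀ j ∈ bs, v ^^^ 2^i ≠ v ^^^ 2^j := by
        intro j hj h
        exact hnotin (pvCell_inj h ▸ hj)
      simp only [List.foldl_cons]
      by_cases hcond : dis[v ^^^ 2^i]? = some none
      · have hlt : v ^^^ 2^i < dis.length := pvLt_of_getElem? hcond
        rw [pvInnerN_eq]
        simp only [hcond, if_pos]
        set dis' := dis.set (v ^^^ 2^i) (some (d + 1)) with hdis'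
        have hsame : ∀ j ∈ bs, dis'[v ^^^ 2^j]? = dis[v ^^^ 2^j]? := by
          intro j hj
          exact List.getElem?_set_ne (hcellne j hj)
        obtain ⟨ihl, ihq, ihu, ihc⟩ := ih hndbs dis' (rest ++ [(((v ^^^ 2^i : Nat) : Int), d + 1)])
        refine ⟨by simpa [hdis'] using ihl, ?_, ?_, ?_⟩
        · rw [ihq]
          have hfilter : bs.filter (fun j => decide (dis'[v ^^^ 2^j]? = some none)) =
              bs.filter (fun j => decide (dis[v ^^^ 2^j]? = some none)) := by
            apply List.filter_congr
            intro j hj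
            simp [hsame j hj]
          rw [hfilter]
          simp [List.filter_cons, hcond, List.append_assoc]
        · intro w hw
          have h1 := ihu w (fun j hj => hw j (List.mem_cons_of_mem _ hj))
          rw [h1, hdis', List.getElem?_set_ne (Ne.symm (hw i (List.mem_cons_self)))]
        · intro j hj
          rcases List.mem_cons.mp hj with h | h
          · subst h
            have h1 := ihu (v ^^^ 2^j) (fun k hk => hcellne k hk)
            rw [h1, hdis', List.getElem?_set_self hlt, if_pos hcond]
          · have h1 := ihc j h
            rw [h1, hsame j h]
      · rw [pvInnerN_eq]
        simp only [hcond, if_neg, ite_false]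
        obtain ⟨ihl, ihq, ihu, ihc⟩ := ih hndbs dis rest
        refine ⟨ihl, ?_, ?_, ?_⟩
        · rw [ihq]
          simp [List.filter_cons, hcond]
        · intro w hw
          exact ihu w (fun j hj => hw j (List.mem_cons_of_mem _ hj))
        · intro j hj
          rcases List.mem_cons.mp hj with h | h
          · subst h
            rw [if_neg hcond]
            exact ihu (v ^^^ 2^j) (fun k hk => hcellne k hk)
          · exact ihc j h

-- ===== BFS invariant =====

structure pvInv (srcs : List Nat) (m : Nat) (dis : List (Option Int)) (q : List (Int × Int)) : Prop where
  len : dis.length = 2^m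
  entries : ∀ p ∈ q, ∃ v e : Nat, p = ((v : Int), (e : Int)) ∧ v < 2^m ∧ dis[v]? = some (some (e : Int))
  labels : ∀ v : Nat, v < 2^m → ∀ z : Int, dis[v]? = some (some z) → ∃ e : Nat, z = (e : Int) ∧ pvIsMin srcs m v e
  pair : q.Pairwise (fun a b => a.2 ≤ b.2)
  cap : ∀ p ∈ q, ∀ p0 ∈ q.head?, p.2 ≤ p0.2 + 1
  closure : ∀ v : Nat, v < 2^m → ∀ z : Int, dis[v]? = some (some z) → ((v : Int), z) ∈ q ∨ pvClosed m dis v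
  sources : ∀ s ∈ srcs, dis[s]? = some (some 0)
  low : ∀ v : Nat, v < 2^m → ∀ e : Nat, pvIsMin srcs m v e → (∀ p ∈ q, (e : Int) < p.2) →
    pvLabeled dis v ∧ pvClosed m dis v

theorem pvPow_lt {i m : Nat} (h : i < m) : (2:Nat)^i < 2^m :=
  Nat.pow_lt_pow_right (by norm_num) h

theorem pvPairwise_const (d : Int) (l : List (Int × Int)) (h : ∀ a ∈ l, a.2 = d) :
    l.Pairwise (fun a b => a.2 ≤ b.2) := by
  induction l with
  | nil => simp
  | cons a t ih =>
      refine List.Pairwise.cons ?_ (ih (fun b hb => h b (List.mem_cons_of_mem _ hb)))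
      intro b hb
      rw [h a List.mem_cons_self, h b (List.mem_cons_of_mem _ hb)]

-- the newly labeled vertices carry the correct distance e0 + 1
theorem pvNewLabel (srcs : List Nat) (m : Nat) (hsrc : ∀ s ∈ srcs, s < 2^m)
    (dis : List (Option Int)) (q : List (Int × Int)) (v e0 : Nat) (hv : v < 2^m)
    (hinv : pvInv srcs m dis q)
    (hmin : pvIsMin srcs m v e0)
    (hfront : ∀ p ∈ q, ((e0 : Int)) ≤ p.2)
    (i : Nat) (hi : i < m) (hcell : dis[v ^^^ 2^i]? = some none) :
    pvIsMin srcs m (v ^^^ 2^i) (e0 + 1) := by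
  have hy : v ^^^ 2^i < 2^m := Nat.xor_lt_two_pow hv (pvPow_lt hi)
  obtain ⟨e', he'⟩ := pvIsMin_exists srcs m (v ^^^ 2^i) (pvIsMin_nonempty srcs hmin)
  obtain ⟨hb1, hb2⟩ := pvIsMin_flip srcs hi hmin he'
  by_cases hle : e' ≤ e0
  · exfalso
    have hlab : pvLabeled dis (v ^^^ 2^i) := by
      rcases Nat.lt_or_ge e' e0 with hlt | hge
      · exact (hinv.low (v ^^^ 2^i) hy e' he' (fun p hp => lt_of_lt_of_le (by exact_mod_cast hlt) (hfront p hp))).1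
      · have heq : e' = e0 := by omega
        cases e0 with
        | zero =>
            rw [heq] at he'
            obtain ⟨⟨s, hs, hse⟩, _⟩ := he'
            have : v ^^^ 2^i = s := pvPop_xor_eq_zero hy (hsrc s hs) hse
            exact ⟨0, by rw [this]; exact hinv.sources s hs⟩
        | succ e1 =>
            rw [heq] at he'
            obtain ⟨j, hj, hj'⟩ := pvIsMin_descent srcs he'
            have hlow := hinv.low ((v ^^^ 2^i) ^^^ 2^j) (Nat.xor_lt_two_pow hy (pvPow_lt hj)) e1 hj'
              (fun p hp => lt_of_lt_of_le (by exact_mod_cast Nat.lt_succ_self e1) (hfront p hp))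
            have := hlow.2 j hj
            rwa [Nat.xor_xor_cancel_right] at this
    obtain ⟨z, hz⟩ := hlab
    rw [hcell] at hz
    simp at hz
  · have : e' = e0 + 1 := by omega
    subst this
    exact he'

theorem pvFst_eq {w v : Nat} {z d : Int} (h : ((w : Int), z) = ((v : Int), d)) : w = v := by
  have := congrArg Prod.fst h
  simp at this
  exact_mod_cast this

theorem pvSnd_eq {w v : Nat} {z d : Int} (h : ((w : Int), z) = ((v : Int), d)) : z = d := by
  have := congrArg Prod.snd h
  simpa using this

theorem pvStepA_eq (m v : Nat) (d : Int) (st : List (Option Int) × List (Int × Int)) :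
    pvStepA (m : Int) ((v : Int)) d st = (List.range m).foldl (pvInnerN v d) st := by
  unfold pvStepA
  rw [PySem.List.pyRange_one]
  simp only [Int.sub_zero, Int.toNat_natCast, List.foldl_map, zero_add]
  rfl

theorem pvInv_step (srcs : List Nat) (m : Nat) (hsrc : ∀ s ∈ srcs, s < 2^m)
    (dis : List (Option Int)) (rest : List (Int × Int)) (x d : Int)
    (hinv : pvInv srcs m dis ((x, d) :: rest)) :
    pvInv srcs m (pvStepA (m : Int) x d (dis, rest)).1 (pvStepA (m : Int) x d (dis, rest)).2 := by
  obtain ⟨v, e0, hxd, hv, hcellv⟩ := hinv.entries (x, d) List.mem_cons_self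
  obtain ⟨hx, hd⟩ := Prod.mk.injEq .. ▸ hxd
  subst hx; subst hd
  rw [pvStepA_eq]
  set res := (List.range m).foldl (pvInnerN v ((e0 : Int))) (dis, rest) with hres
  obtain ⟨hL, hQ, hU, hC⟩ := pvStep_char v ((e0 : Int)) (List.range m) (List.nodup_range) dis rest
  set newQ := ((List.range m).filter (fun i => decide (dis[v ^^^ 2^i]? = some none))).map
      (fun i => (((v ^^^ 2^i : Nat) : Int), (e0 : Int) + 1)) with hnewQ
  -- basic facts about the old state
  have hmin : pvIsMin srcs m v e0 := by
    obtain ⟨e, he, hm⟩ := hinv.labels v hv _ hcellv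
    have : e = e0 := by exact_mod_cast he.symm
    rwa [this] at hm
  have hfront : ∀ p ∈ (((v : Int), (e0 : Int)) :: rest), (e0 : Int) ≤ p.2 := by
    intro p hp
    rcases List.mem_cons.mp hp with h | h
    · rw [h]
    · exact (List.pairwise_cons.mp hinv.pair).1 p h
  have hcap : ∀ p ∈ (((v : Int), (e0 : Int)) :: rest), p.2 ≤ (e0 : Int) + 1 := by
    intro p hp
    simpa using hinv.cap p hp ((v : Int), (e0 : Int)) rfl
  have hnewlab : ∀ i < m, dis[v ^^^ 2^i]? = some none → pvIsMin srcs m (v ^^^ 2^i) (e0 + 1) :=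
    fun i hi hc => pvNewLabel srcs m hsrc dis _ v e0 hv hinv hmin hfront i hi hc
  -- cell bookkeeping
  have hmono : ∀ w : Nat, ∀ z : Int, dis[w]? = some (some z) → res.1[w]? = some (some z) := by
    intro w z hz
    by_cases hcell : ∃ i ∈ List.range m, w = v ^^^ 2^i
    · obtain ⟨i, hi, rfl⟩ := hcell
      rw [hC i hi, if_neg (by rw [hz]; simp)]
      exact hz
    · rw [hU w (fun i hi h => hcell ⟨i, hi, h⟩)]
      exact hz
  have hlabmono : ∀ w : Nat, pvLabeled dis w → pvLabeled res.1 w := by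
    rintro w ⟨z, hz⟩
    exact ⟨z, hmono w z hz⟩
  have hclosedmono : ∀ w : Nat, pvClosed m dis w → pvClosed m res.1 w := by
    intro w hw i hi
    exact hlabmono _ (hw i hi)
  have hreslab : ∀ i < m, dis[v ^^^ 2^i]? = some none →
      res.1[v ^^^ 2^i]? = some (some ((e0 : Int) + 1)) := by
    intro i hi hc
    rw [hC i (List.mem_range.mpr hi), if_pos hc]
  have hcellval : ∀ i < m, dis[v ^^^ 2^i]? = some none ∨ ∃ z : Int, dis[v ^^^ 2^i]? = some (some z) := by
    intro i hi
    have hlt : v ^^^ 2^i < dis.length := by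
      rw [hinv.len]; exact Nat.xor_lt_two_pow hv (pvPow_lt hi)
    rw [List.getElem?_eq_getElem hlt]
    cases dis[v ^^^ 2^i] with
    | none => exact Or.inl rfl
    | some z => exact Or.inr ⟨z, rfl⟩
  have hclosedv : pvClosed m res.1 v := by
    intro i hi
    rcases hcellval i hi with h | ⟨z, h⟩
    · exact ⟨_, hreslab i hi h⟩
    · exact ⟨z, hmono _ z h⟩
  have hmemnewQ : ∀ i < m, dis[v ^^^ 2^i]? = some none →
      (((v ^^^ 2^i : Nat) : Int), (e0 : Int) + 1) ∈ res.2 := by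
    intro i hi hc
    rw [hQ]
    refine List.mem_append_right _ (List.mem_map.mpr ⟨i, List.mem_filter.mpr ⟨List.mem_range.mpr hi, by simp [hc]⟩, rfl⟩)
  have hnewQsnd : ∀ p ∈ newQ, p.2 = (e0 : Int) + 1 := by
    intro p hp
    obtain ⟨i, _, rfl⟩ := List.mem_map.mp hp
    rfl
  have hnewQshape : ∀ p ∈ newQ, ∃ i, i < m ∧ dis[v ^^^ 2^i]? = some none ∧
      p = (((v ^^^ 2^i : Nat) : Int), (e0 : Int) + 1) := by
    intro p hp
    obtain ⟨i, hi, rfl⟩ := List.mem_map.mp hp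
    obtain ⟨hir, hic⟩ := List.mem_filter.mp hi
    exact ⟨i, List.mem_range.mp hir, by simpa using hic, rfl⟩
  -- the invariant fields for the new state
  have hLen : res.1.length = 2^m := hL.trans hinv.len
  have hEntries : ∀ p ∈ res.2, ∃ w e : Nat, p = ((w : Int), (e : Int)) ∧ w < 2^m ∧
      res.1[w]? = some (some (e : Int)) := by
    intro p hp
    rw [hQ] at hp
    rcases List.mem_append.mp hp with h | h
    · obtain ⟨w, e, rfl, hw, hcel⟩ := hinv.entries p (List.mem_cons_of_mem _ h)
      exact ⟨w, e, rfl, hw, hmono w _ hcel⟩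
    · obtain ⟨i, hi, hic, rfl⟩ := hnewQshape p h
      exact ⟨v ^^^ 2^i, e0 + 1, by push_cast; rfl,
        Nat.xor_lt_two_pow hv (pvPow_lt hi), by rw [hreslab i hi hic]; push_cast; rfl⟩
  have hLabels : ∀ w : Nat, w < 2^m → ∀ z : Int, res.1[w]? = some (some z) →
      ∃ e : Nat, z = (e : Int) ∧ pvIsMin srcs m w e := by
    intro w hw z hz
    by_cases hcell : ∃ i ∈ List.range m, w = v ^^^ 2^i
    · obtain ⟨i, hi, rfl⟩ := hcell
      rw [hC i hi] at hz
      by_cases hcond : dis[v ^^^ 2^i]? = some none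
      · rw [if_pos hcond] at hz
        have hzz : z = (e0 : Int) + 1 := by
          have := hz; simp only [Option.some.injEq] at this; omega
        exact ⟨e0 + 1, by push_cast [hzz]; ring, hnewlab i (List.mem_range.mp hi) hcond⟩
      · rw [if_neg hcond] at hz
        exact hinv.labels _ hw z hz
    · rw [hU w (fun i hi h => hcell ⟨i, hi, h⟩)] at hz
      exact hinv.labels _ hw z hz
  have hPair : res.2.Pairwise (fun a b => a.2 ≤ b.2) := by
    rw [hQ]
    refine List.pairwise_append.mpr ⟨hinv.pair.of_cons, pvPairwise_const _ _ hnewQsnd, ?_⟩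
    intro a ha b hb
    rw [hnewQsnd b hb]
    exact hcap a (List.mem_cons_of_mem _ ha)
  have hCap : ∀ p ∈ res.2, ∀ p0 ∈ res.2.head?, p.2 ≤ p0.2 + 1 := by
    intro p hp p0 hp0
    rw [hQ] at hp
    cases hrest : rest with
    | nil =>
        rw [hrest, List.nil_append] at hp
        rw [hQ, hrest, List.nil_append] at hp0
        have h1 := hnewQsnd p hp
        have h2 := hnewQsnd p0 (List.mem_of_mem_head? hp0)
        omega
    | cons r0 rs =>
        rw [hQ, hrest, List.cons_append] at hp0
        simp only [List.head?_cons, Option.mem_def, Option.some.injEq] at hp0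
        subst hp0
        have hr0 : (e0 : Int) ≤ r0.2 := hfront r0 (by rw [hrest]; exact List.mem_cons_of_mem _ List.mem_cons_self)
        rcases List.mem_append.mp hp with h | h
        · have := hcap p (List.mem_cons_of_mem _ (hrest ▸ h))
          omega
        · have := hnewQsnd p h
          omega
  have hClosure : ∀ w : Nat, w < 2^m → ∀ z : Int, res.1[w]? = some (some z) →
      ((w : Int), z) ∈ res.2 ∨ pvClosed m res.1 w := by
    intro w hw z hz
    by_cases hcell : ∃ i ∈ List.range m, w = v ^^^ 2^i
    · obtain ⟨i, hi, rfl⟩ := hcell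
      rw [hC i hi] at hz
      by_cases hcond : dis[v ^^^ 2^i]? = some none
      · rw [if_pos hcond] at hz
        have hzz : z = (e0 : Int) + 1 := by
          have := hz; simp only [Option.some.injEq] at this; omega
        subst hzz
        exact Or.inl (hmemnewQ i (List.mem_range.mp hi) hcond)
      · rw [if_neg hcond] at hz
        rcases hinv.closure _ hw z hz with hm | hcl
        · rcases List.mem_cons.mp hm with h | h
          · have hwv : (v ^^^ 2^i : Nat) = v ∧ z = (e0 : Int) := ⟨pvFst_eq h, pvSnd_eq h⟩
            rw [hwv.1]
            exact Or.inr hclosedv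
          · exact Or.inl (by rw [hQ]; exact List.mem_append_left _ h)
        · exact Or.inr (hclosedmono _ hcl)
    · rw [hU w (fun i hi h => hcell ⟨i, hi, h⟩)] at hz
      rcases hinv.closure _ hw z hz with hm | hcl
      · rcases List.mem_cons.mp hm with h | h
        · have hwv : w = v ∧ z = (e0 : Int) := ⟨pvFst_eq h, pvSnd_eq h⟩
          rw [hwv.1]
          exact Or.inr hclosedv
        · exact Or.inl (by rw [hQ]; exact List.mem_append_left _ h)
      · exact Or.inr (hclosedmono _ hcl)
  have hSources : ∀ s ∈ srcs, res.1[s]? = some (some 0) :=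
    fun s hs => hmono s 0 (hinv.sources s hs)
  have hLow : ∀ e : Nat, ∀ w : Nat, w < 2^m → pvIsMin srcs m w e →
      (∀ p ∈ res.2, (e : Int) < p.2) → pvLabeled res.1 w ∧ pvClosed m res.1 w := by
    intro e
    induction e using Nat.strong_induction_on with
    | _ e IH =>
    intro w hw hmine hall
    rcases lt_trichotomy e e0 with hlt | heq | hgt
    · have hold := hinv.low w hw e hmine (by
        intro p hp
        have := hfront p hp
        have : ((e : Nat) : Int) < ((e0 : Nat) : Int) := by exact_mod_cast hlt
        omega)
      exact ⟨hlabmono w hold.1, hclosedmono w hold.2⟩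
    · subst heq
      have hlabold : pvLabeled dis w := by
        cases he : e with
        | zero =>
            rw [he] at hmine
            obtain ⟨⟨s, hs, hse⟩, _⟩ := hmine
            exact ⟨0, by rw [pvPop_xor_eq_zero hw (hsrc s hs) hse]; exact hinv.sources s hs⟩
        | succ e1 =>
            rw [he] at hmine
            obtain ⟨j, hj, hj'⟩ := pvIsMin_descent srcs hmine
            have hlow := hinv.low (w ^^^ 2^j) (Nat.xor_lt_two_pow hw (pvPow_lt hj)) e1 hj' (by
              intro p hp
              have := hfront p hp
              omega)
            have := hlow.2 j hj
            rwa [Nat.xor_xor_cancel_right] at this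
      obtain ⟨z, hz⟩ := hlabold
      obtain ⟨e'', hze, hmin''⟩ := hinv.labels w hw z hz
      have he'' : e'' = e := pvIsMin_unique hmin'' hmine
      rcases hinv.closure w hw z hz with hm | hcl
      · rcases List.mem_cons.mp hm with h | h
        · have hwv : w = v := pvFst_eq h
          subst hwv
          exact ⟨⟨((e : Nat) : Int), hmono w _ hcellv⟩, hclosedv⟩
        · exfalso
          have := hall ((w : Int), z) (by rw [hQ]; exact List.mem_append_left _ h)
          rw [hze, he''] at this
          simp at this
      · exact ⟨hlabmono w ⟨z, hz⟩, hclosedmono w hcl⟩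
    · have hrestnil : rest = [] := by
        cases hrest : rest with
        | nil => rfl
        | cons r0 rs =>
            exfalso
            have hm : r0 ∈ res.2 := by
              rw [hQ, hrest]
              exact List.mem_append_left _ List.mem_cons_self
            have h1 := hall r0 hm
            have h2 := hcap r0 (by rw [hrest]; exact List.mem_cons_of_mem _ List.mem_cons_self)
            have : ((e : Nat) : Int) < (e0 : Int) + 1 := by omega
            have : e < e0 + 1 := by exact_mod_cast this
            omega
      have hresnil : res.2 = [] := by
        rw [hQ, hrestnil, List.nil_append]
        cases hq2 : newQ with
        | nil => simpa [hnewQ] using hq2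
        | cons p ps =>
            exfalso
            have hmem : p ∈ newQ := by rw [hq2]; exact List.mem_cons_self
            have h1 := hall p (by rw [hQ, hrestnil, List.nil_append]; exact hnewQ ▸ hmem)
            have h2 := hnewQsnd p hmem
            have : ((e : Nat) : Int) < (e0 : Int) + 1 := by omega
            have : e < e0 + 1 := by exact_mod_cast this
            omega
      cases he : e with
      | zero => omega
      | succ e1 =>
          rw [he] at hmine
          obtain ⟨j, hj, hj'⟩ := pvIsMin_descent srcs hmine
          have hIH := IH e1 (by omega) (w ^^^ 2^j) (Nat.xor_lt_two_pow hw (pvPow_lt hj)) hj' (by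
            intro p hp
            rw [hresnil] at hp
            simp at hp)
          have hlabw : pvLabeled res.1 w := by
            have := hIH.2 j hj
            rwa [Nat.xor_xor_cancel_right] at this
          obtain ⟨z, hz⟩ := hlabw
          rcases hClosure w hw z hz with hm | hcl
          · rw [hresnil] at hm
            simp at hm
          · exact ⟨⟨z, hz⟩, hcl⟩
  exact ⟨hLen, hEntries, hLabels, hPair, hCap, hClosure, hSources,
    fun w hw e he hall => hLow e w hw he hall⟩

theorem pvBfsA_nil (m : Int) (dis : List (Option Int)) : pvBfsA m dis [] = dis := by
  rw [pvBfsA]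

theorem pvBfsA_cons (m : Int) (dis : List (Option Int)) (x d : Int) (rest : List (Int × Int)) :
    pvBfsA m dis ((x, d) :: rest) =
      pvBfsA m (pvStepA m x d (dis, rest)).1 (pvStepA m x d (dis, rest)).2 := by
  rw [pvBfsA]

theorem pvInv_final (srcs : List Nat) (m : Nat) (dis : List (Option Int))
    (hinv : pvInv srcs m dis []) (w : Nat) (hw : w < 2^m) (e : Nat)
    (he : pvIsMin srcs m w e) : dis[w]? = some (some (e : Int)) := by
  obtain ⟨⟨z, hz⟩, _⟩ := hinv.low w hw e he (by simp)
  obtain ⟨e'', hze, hmin''⟩ := hinv.labels w hw z hz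
  rw [hz, hze, pvIsMin_unique hmin'' he]

theorem pvBfsA_correct (srcs : List Nat) (m : Nat) (hsrc : ∀ s ∈ srcs, s < 2^m) :
    ∀ (N : Nat) (dis : List (Option Int)) (q : List (Int × Int)),
      countNone dis + q.length ≤ N → pvInv srcs m dis q →
      ∀ w : Nat, w < 2^m → ∀ e : Nat, pvIsMin srcs m w e →
      (pvBfsA (m : Int) dis q)[w]? = some (some (e : Int)) := by
  intro N
  induction N with
  | zero =>
      intro dis q hN hinv w hw e he
      have hq : q = [] := by
        cases q with
        | nil => rfl
        | cons p t => simp at hN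
      subst hq
      rw [pvBfsA_nil]
      exact pvInv_final srcs m dis hinv w hw e he
  | succ N ih =>
      intro dis q hN hinv w hw e he
      cases q with
      | nil =>
          rw [pvBfsA_nil]
          exact pvInv_final srcs m dis hinv w hw e he
      | cons p rest =>
          obtain ⟨x, d⟩ := p
          rw [pvBfsA_cons]
          have hmeas := pvStepA_meas_le (m : Int) x d (dis, rest)
          exact ih _ _ (by simp only [List.length_cons] at hN; simp at hmeas ⊢; omega)
            (pvInv_step srcs m hsrc dis rest x d hinv) w hw e he

-- characterization of the initialisation folds
theorem pvInitA_split (l : List Int) :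
    ∀ (s : Int) (dis : List (Option Int)) (acc : List (Int × Int)),
    ((PySem.List.enumerate l s).foldl
      (fun st (p : Int × Int) => (PySem.List.pySetD st.1 p.2 (some 0), st.2 ++ [(p.2, (0 : Int))]))
      (dis, acc)) =
    (l.foldl (fun ds x => PySem.List.pySetD ds x (some 0)) dis,
      acc ++ l.map (fun x => (x, (0 : Int)))) := by
  induction l with
  | nil => intro s dis acc; simp [PySem.List.enumerate_nil]
  | cons x t ih =>
      intro s dis acc
      rw [PySem.List.enumerate_cons, List.foldl_cons, List.foldl_cons]
      rw [ih]
      simp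

theorem pvSetFold_len {α : Type} (c : α) (l : List Int) :
    ∀ dis : List α, (l.foldl (fun ds x => PySem.List.pySetD ds x c) dis).length = dis.length := by
  induction l with
  | nil => intro dis; rfl
  | cons x t ih =>
      intro dis
      rw [List.foldl_cons, ih, PySem.List.length_pySetD]

theorem pvSetFold_cells {α : Type} (c : α) (l : List Int) :
    ∀ dis : List α, (∀ x ∈ l, 0 ≤ x ∧ x < (dis.length : Int)) → ∀ w : Nat, w < dis.length →
      (l.foldl (fun ds x => PySem.List.pySetD ds x c) dis)[w]? =
        if ∃ x ∈ l, x = (w : Int) then some c else dis[w]? := by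
  induction l with
  | nil => intro dis _ w hw; simp
  | cons x t ih =>
      intro dis hl w hw
      rw [List.foldl_cons]
      obtain ⟨hx0, hxlt⟩ := hl x List.mem_cons_self
      have hset : PySem.List.pySetD dis x c = dis.set x.toNat c :=
        PySem.List.pySetD_of_nonneg dis c hx0
      have hlen : (PySem.List.pySetD dis x c).length = dis.length := PySem.List.length_pySetD ..
      have ih' := ih (PySem.List.pySetD dis x c)
        (by intro y hy; have := hl y (List.mem_cons_of_mem _ hy); rwa [hlen])
        w (by rwa [hlen])
      rw [ih']
      by_cases ht : ∃ y ∈ t, y = (w : Int)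
      · rw [if_pos ht, if_pos ⟨ht.choose, List.mem_cons_of_mem _ ht.choose_spec.1, ht.choose_spec.2⟩]
      · rw [if_neg ht]
        by_cases hxw : x = (w : Int)
        · rw [if_pos ⟨x, List.mem_cons_self, hxw⟩, hset]
          have : x.toNat = w := by omega
          rw [this, List.getElem?_set_self hw]
        · rw [if_neg (by rintro ⟨y, hy, rfl⟩
                         rcases List.mem_cons.mp hy with h | h
                         · exact hxw h.symm
                         · exact ht ⟨_, h, rfl⟩), hset]
          exact List.getElem?_set_ne (by omega)

theorem pvShl1_eq (m : Int) : pvShl1 m = ((2^m.toNat : Nat) : Int) := by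
  simp [pvShl1, Int.shiftLeft_eq]

-- the initial state of A's BFS satisfies the invariant
theorem pvInv_init (nums : List Int) (M : Nat)
    (hpre : ∀ x ∈ nums, 0 ≤ x ∧ x < ((2^M : Nat) : Int)) :
    pvInv (nums.map Int.toNat) M
      (nums.foldl (fun ds x => PySem.List.pySetD ds x (some 0))
        (List.replicate (2^M) (none : Option Int)))
      (nums.map (fun x => (x, (0 : Int)))) := by
  set srcs := nums.map Int.toNat with hsrcs
  set dis0 := nums.foldl (fun ds x => PySem.List.pySetD ds x (some 0))
    (List.replicate (2^M) (none : Option Int)) with hdis0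
  have hlen : dis0.length = 2^M := by rw [hdis0, pvSetFold_len]; simp
  have hcells : ∀ w : Nat, w < 2^M →
      dis0[w]? = if ∃ x ∈ nums, x = (w : Int) then some (some 0) else some none := by
    intro w hw
    rw [hdis0, pvSetFold_cells _ nums _
      (by intro x hx; have := hpre x hx; simpa using this) w (by simpa using hw)]
    split_ifs
    · rfl
    · exact List.getElem?_replicate.trans (by simp [hw]) |>.trans rfl
  have hmem : ∀ w : Nat, (∃ x ∈ nums, x = (w : Int)) ↔ w ∈ srcs := by
    intro w
    constructor
    · rintro ⟨x, hx, hxw⟩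
      exact List.mem_map.mpr ⟨x, hx, by omega⟩
    · intro h
      obtain ⟨x, hx, rfl⟩ := List.mem_map.mp h
      exact ⟨x, hx, by have := (hpre x hx).1; omega⟩
  have hsrcbound : ∀ s ∈ srcs, s < 2^M := by
    intro s hs
    obtain ⟨x, hx, rfl⟩ := List.mem_map.mp hs
    have := hpre x hx
    omega
  have hisMin0 : ∀ w ∈ srcs, pvIsMin srcs M w 0 :=
    fun w hw => ⟨⟨w, hw, by simp [Nat.xor_self, pvPop]⟩, fun s _ => Nat.zero_le _⟩
  have hq0 : ∀ p ∈ nums.map (fun x => (x, (0 : Int))), p.2 = 0 := by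
    intro p hp
    obtain ⟨x, hx, rfl⟩ := List.mem_map.mp hp
    rfl
  refine ⟨hlen, ?_, ?_, ?_, ?_, ?_, ?_, ?_⟩
  · intro p hp
    obtain ⟨x, hx, rfl⟩ := List.mem_map.mp hp
    have hx' := hpre x hx
    refine ⟨x.toNat, 0, ?_, by omega, ?_⟩
    · rw [Prod.mk.injEq]
      constructor
      · omega
      · simp
    · rw [hcells x.toNat (by omega), if_pos ⟨x, hx, by omega⟩]
      simp
  · intro w hw z hz
    rw [hcells w hw] at hz
    split_ifs at hz with h
    · refine ⟨0, by simpa using hz.symm, hisMin0 w ((hmem w).mp h)⟩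
    · simp at hz
  · exact pvPairwise_const 0 _ hq0
  · intro p hp p0 hp0
    rw [hq0 p hp, hq0 p0 (List.mem_of_mem_head? hp0)]
    omega
  · intro w hw z hz
    rw [hcells w hw] at hz
    split_ifs at hz with h
    · obtain ⟨x, hx, hxw⟩ := h
      have hz0 : z = 0 := by simpa using hz.symm
      subst hz0
      exact Or.inl (List.mem_map.mpr ⟨x, hx, by rw [hxw]⟩)
    · simp at hz
  · intro s hs
    rw [hcells s (hsrcbound s hs), if_pos ((hmem s).mpr hs)]
  · intro w hw e he hall
    exfalso
    obtain ⟨⟨s, hs, _⟩, _⟩ := he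
    cases hn : nums with
    | nil =>
        rw [hsrcs, hn] at hs
        simp at hs
    | cons x t =>
        have := hall (x, 0) (by rw [hn]; exact List.mem_map.mpr ⟨x, List.mem_cons_self, rfl⟩)
        simp at this
        omega

-- ===== B-side table lemmas =====

def pvPassB (M : Nat) (dis : List Int) (k : Nat) : List Int :=
  (PySem.List.pyRange 0 ((2^M : Nat) : Int) 1).map
    (fun y => min (PySem.List.pyGetD dis y 0)
      (PySem.List.pyGetD dis (PySem.Int.bxor y (pvShl1 (k : Int))) 0 + 1))

theorem pvPassB_tab (M k : Nat) (hk : k < M) (dis : List Int) (f : Nat → Int)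
    (htab : ∀ w : Nat, w < 2^M → dis[w]? = some (f w)) :
    (pvPassB M dis k).length = 2^M ∧
    ∀ w : Nat, w < 2^M → (pvPassB M dis k)[w]? = some (min (f w) (f (w ^^^ 2^k) + 1)) := by
  unfold pvPassB
  rw [PySem.List.pyRange_one]
  constructor
  · rw [List.length_map, List.length_map, List.length_range]
    have h : ((2 : Int))^M = ((2^M : Nat) : Int) := by push_cast; ring
    simp only [Int.sub_zero]
    rw [show (((2^M : Nat) : Int)).toNat = 2^M from Int.toNat_natCast _]
  · intro w hw
    rw [List.map_map, List.getElem?_map, List.getElem?_range (by omega)]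
    have hget : ∀ u : Nat, u < 2^M → PySem.List.pyGetD dis ((u : Nat) : Int) 0 = f u := by
      intro u hu
      rw [PySem.List.pyGetD_natCast, List.getD_eq_getElem?_getD, htab u hu]
      rfl
    simp only [Option.map_some, Function.comp_apply, Option.some.injEq]
    have h0 : ((0 : Int) + (w : Int)) = ((w : Nat) : Int) := by omega
    rw [pvShl1_natCast, h0, PySem.Int.bxor_natCast, hget w hw,
      hget (w ^^^ 2^k) (Nat.xor_lt_two_pow hw (pvPow_lt hk))]

theorem pvB_passes (M : Nat) (srcs : List Nat) (k : Nat) (hk : k ≤ M) :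
    ∀ (dis0 : List Int), (∀ w : Nat, w < 2^M → dis0[w]? = some (pvBk srcs M 0 w)) →
    ∀ w : Nat, w < 2^M →
      ((List.range k).foldl (pvPassB M) dis0)[w]? = some (pvBk srcs M k w) := by
  induction k with
  | zero => intro dis0 htab w hw; simpa using htab w hw
  | succ k ih =>
      intro dis0 htab w hw
      rw [List.range_succ, List.foldl_append, List.foldl_cons, List.foldl_nil]
      have htabk := ih (by omega) dis0 htab
      have := (pvPassB_tab M k (by omega) _ (fun u => pvBk srcs M k u) htabk).2 w hw
      rw [this, ← pvBk_succ srcs M k w (by omega)]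

theorem pvFoldPass_eq (M : Nat) (d0 : List Int) :
    (PySem.List.pyRange 0 ((M : Nat) : Int) 1).foldl
      (fun dis i =>
        let bit := pvShl1 i
        (PySem.List.pyRange 0 ((2^M : Nat) : Int) 1).map
          (fun y => min (PySem.List.pyGetD dis y 0)
            (PySem.List.pyGetD dis (PySem.Int.bxor y bit) 0 + 1)))
      d0
    = (List.range M).foldl (pvPassB M) d0 := by
  rw [show PySem.List.pyRange 0 ((M : Nat) : Int) 1 = List.map (fun k : Nat => (k : Int)) (List.range M) from by
      rw [PySem.List.pyRange_one]; simp only [Int.sub_zero, Int.toNat_natCast, zero_add]]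
  rw [List.foldl_map]
  rfl

-- ===== VERDICT (by name: the statement is the Claim_ definition above) =====
theorem maxHammingDistances_spec : Claim_equal_maxHammingDistances := by
  intro nums m _ hpre
  obtain ⟨hm, hx⟩ := hpre
  unfold Spec_maxHammingDistances
  set M := m.toNat with hM
  have hmM : m = (M : Int) := by omega
  have h2 : ((2^M : Nat) : Int) = (2 : Int) ^ M := by push_cast; ring
  have hpre' : ∀ x ∈ nums, 0 ≤ x ∧ x < ((2^M : Nat) : Int) := by
    intro x hxm
    have := hx x hxm
    omega
  set srcs := nums.map Int.toNat with hsrcs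
  have hsrc : ∀ s ∈ srcs, s < 2^M := by
    intro s hs
    obtain ⟨x, hxm, rfl⟩ := List.mem_map.mp hs
    have := hpre' x hxm
    omega
  simp only [maxHammingDistances, maxHammingDistances_alt]
  rw [pvShl1_eq m, ← hM]
  simp only [Int.toNat_natCast]
  rw [pvInitA_split, List.nil_append]
  have hinv := pvInv_init nums M hpre'
  have htabA := pvBfsA_correct srcs M hsrc
    (countNone (nums.foldl (fun ds x => PySem.List.pySetD ds x (some 0))
      (List.replicate (2^M) (none : Option Int))) + (nums.map (fun x => (x, (0 : Int)))).length)
    _ _ le_rfl hinv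
  rw [hmM, pvFoldPass_eq]
  have htabB0 : ∀ w : Nat, w < 2^M →
      (nums.foldl (fun ds x => PySem.List.pySetD ds x (0 : Int))
        (List.replicate (2^M) (((M : Nat) : Int) + 1)))[w]? = some (pvBk srcs M 0 w) := by
    intro w hw
    rw [pvSetFold_cells _ nums _ (by intro x hxm; have := hpre' x hxm; simpa using this) w
      (by simpa using hw)]
    rw [pvBk_zero]
    by_cases hmem : ∃ x ∈ nums, x = (w : Int)
    · obtain ⟨x, hxm, hxw⟩ := hmem
      rw [if_pos ⟨x, hxm, hxw⟩, if_pos (List.mem_map.mpr ⟨x, hxm, by omega⟩)]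
    · rw [if_neg hmem, if_neg (by
        intro hc
        obtain ⟨x, hxm, rfl⟩ := List.mem_map.mp hc
        exact hmem ⟨x, hxm, by have := (hpre' x hxm).1; omega⟩)]
      rw [List.getElem?_replicate, if_pos hw]
  have htabB := pvB_passes M srcs M le_rfl _ htabB0
  apply List.map_congr_left
  intro x hxmem
  obtain ⟨hx0, hxlt⟩ := hpre' x hxmem
  have hw : (((2^M : Nat) : Int) - 1 - x).toNat < 2^M := by omega
  have hidx : ((2^M : Nat) : Int) - 1 - x = (((((2^M : Nat) : Int) - 1 - x).toNat : Nat) : Int) := by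
    omega
  set w := (((2^M : Nat) : Int) - 1 - x).toNat with hwdef
  have hne : srcs ≠ [] := List.ne_nil_of_mem (List.mem_map.mpr ⟨x, hxmem, rfl⟩)
  obtain ⟨e, he⟩ := pvIsMin_exists srcs M w hne
  rw [hidx, PySem.List.pyGet?_natCast, htabA w hw e he]
  rw [PySem.List.pyGetD_natCast, List.getD_eq_getElem?_getD, htabB w hw]
  rw [pvBk_full srcs M w e hw hsrc he]
  rfl
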